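-- pv_equiv track=rewrite | github.com/S0NGMinHyuk/programmers-file | 더 맵게.py | solution
-- ===== SOURCE A (Python) =====
-- import heapq                  # heapq 모듈 사용
--
-- def solution(scoville, k):
--     heapq.heapify(scoville)   # 기존 리스트를 힙으로 변환 (sort를 해주는 건 아니다)
--
--     mix = 0                   # 섞는 횟수 카운트
--     while scoville[0] < k:    # 스코빌의 최소값이 k보다 크면 mix 리턴
--         try:                  # 섞기
--             heapq.heappush(scoville, heapq.heappop(scoville) + (heapq.heappop(scoville) * 2))
--         except:               # 스코빌에 값이 1개밖에 없고 k 보다 작다면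
--             return -1         # 만들 수 없는 경우이므로 -1 리턴
--
--         mix += 1              # 섞은 횟수 1 증가
--
--     return mix
-- ===== SOURCE B (Python) =====
-- def solution(scoville, k):
--     # No priority structure at all: repeated selection by linear min-scan on the
--     # unordered pool (mutating scoville in place via remove/append).
--     mix = 0
--     while min(scoville) < k:
--         if len(scoville) < 2:
--             return -1
--         a = min(scoville)
--         scoville.remove(a)
--         b = min(scoville)
--         scoville.remove(b)
--         scoville.append(a + 2 * b)
--         mix += 1
--     return mix
-- ===== Notes on version B (the rewrite author's own statement) =====
-- stated objective: simpler
-- what changed: Drops the heap entirely: B keeps the pool as a plain unordered list and selects each minimum by a linear min() scan with list.remove, appending the mix at the end, instead of heapify/heappop/heappush with try/except.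
import Mathlib
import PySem

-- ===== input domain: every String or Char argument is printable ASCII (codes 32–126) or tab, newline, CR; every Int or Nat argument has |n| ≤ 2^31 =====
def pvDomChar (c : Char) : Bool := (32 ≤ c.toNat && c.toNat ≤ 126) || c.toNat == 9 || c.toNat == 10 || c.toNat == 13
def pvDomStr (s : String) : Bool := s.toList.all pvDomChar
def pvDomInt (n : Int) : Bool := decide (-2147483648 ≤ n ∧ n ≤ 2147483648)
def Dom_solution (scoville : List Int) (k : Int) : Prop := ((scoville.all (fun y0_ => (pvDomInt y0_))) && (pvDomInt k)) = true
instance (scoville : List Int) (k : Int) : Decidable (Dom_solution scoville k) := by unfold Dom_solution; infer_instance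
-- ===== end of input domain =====

-- B drops the heap: it keeps the pool unordered and selects each minimum by a linear
-- min() scan with list.remove (simpler; not faster). Both Pythons mutate `scoville`
-- in place (A heapifies, B removes/appends); the equivalence proved here is about
-- the RETURN value only.

-- ===== PORT A =====
-- heapq has no PySem primitive; it is modelled by a functional min-heap (a skew heap).
-- This is exact on every value A observes: heapq only exposes scoville[0] (the minimum)
-- and the sequence of heappop results (successive minima), which are identical for any
-- correct min-heap.  Recursions are structural over a fuel argument that is exactly the
-- number of heap nodes (each loop iteration removes one element), a totality guard only.
inductive PyHeap : Type
  | nil : PyHeap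
  | nd : Int → PyHeap → PyHeap → PyHeap
deriving DecidableEq, Repr

def PyHeap.size : PyHeap → Nat
  | .nil => 0
  | .nd _ l r => l.size + r.size + 1

def PyHeap.mergeGo : Nat → PyHeap → PyHeap → PyHeap
  | 0, _, t2 => t2                 -- fuel exhausted: unreachable, fuel = total node count
  | _ + 1, .nil, t2 => t2
  | _ + 1, .nd a l1 r1, .nil => .nd a l1 r1
  | n + 1, .nd a l1 r1, .nd b l2 r2 =>
      if a ≤ b then .nd a (PyHeap.mergeGo n r1 (.nd b l2 r2)) l1
      else .nd b (PyHeap.mergeGo n r2 (.nd a l1 r1)) l2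

def PyHeap.merge (t1 t2 : PyHeap) : PyHeap := PyHeap.mergeGo (t1.size + t2.size) t1 t2

def PyHeap.push (v : Int) (t : PyHeap) : PyHeap := PyHeap.merge (.nd v .nil .nil) t

-- heapq.heapify: builds the heap from the list (exact on the observable min-order)
def PyHeap.heapify (xs : List Int) : PyHeap := xs.foldl (fun h x => PyHeap.push x h) .nil

-- the while loop of A: heappop twice (pop root, merge children), heappush the mix;
-- fuel = number of heap nodes (each iteration removes exactly one)
def solutionLoop (k : Int) : Nat → PyHeap → Int → Int
  | 0, _, mix => mix               -- fuel exhausted: unreachable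
  | _ + 1, .nil, mix => mix        -- unreachable: Python raises IndexError on empty scoville (excluded by Pre_)
  | n + 1, .nd a l r, mix =>
      if a < k then
        match l.merge r with
        | .nil => -1               -- second heappop raises IndexError; A's `except` returns -1
        | .nd b l2 r2 => solutionLoop k n (PyHeap.push (a + b * 2) (l2.merge r2)) (mix + 1)
      else mix

def solution (scoville : List Int) (k : Int) : Int :=
  solutionLoop k (PyHeap.heapify scoville).size (PyHeap.heapify scoville) 0

-- ===== PORT B =====
-- the while loop of B: min() scan, list.remove, twice, then append the mix at the end;
-- fuel = list length (each iteration shortens the pool by exactly one)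
def solutionAltLoop (k : Int) : Nat → List Int → Int → Int
  | 0, _, mix => mix               -- fuel exhausted: unreachable
  | n + 1, pool, mix =>
      match PySem.List.min? pool (fun x => x) with
      | none => mix                -- unreachable: min([]) raises ValueError (empty scoville excluded by Pre_)
      | some a =>
          if a < k then
            if pool.length < 2 then -1
            else
              match PySem.List.remove? pool a with
              | none => mix        -- unreachable: the minimum is a member
              | some p1 =>
                  match PySem.List.min? p1 (fun x => x) with
                  | none => mix    -- unreachable: p1 has at least one element
                  | some b =>
                      match PySem.List.remove? p1 b with
                      | none => mix  -- unreachable: the minimum is a member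
                      | some p2 => solutionAltLoop k n (p2 ++ [a + 2 * b]) (mix + 1)
          else mix

def solution_alt (scoville : List Int) (k : Int) : Int :=
  solutionAltLoop k scoville.length scoville 0

-- ===== PRECONDITION & SPEC =====
-- Pre_ excludes only the empty list, on which both Pythons raise (IndexError / ValueError).
def Pre_solution (scoville : List Int) (k : Int) : Prop := scoville ≠ []
instance (scoville : List Int) (k : Int) : Decidable (Pre_solution scoville k) := by
  unfold Pre_solution; infer_instance

def pvWitness_solution : List Int × Int := ([1, 2, 3, 9, 10, 12], 7)

def Spec_solution (scoville : List Int) (k : Int) (out : Int) : Prop := out = solution_alt scoville k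
instance (scoville : List Int) (k : Int) (out : Int) : Decidable (Spec_solution scoville k out) := by unfold Spec_solution; infer_instance

-- ===== CLAIM (what is proved, stated in full; the proofs are below) =====
def Claim_equal_solution : Prop := ∀ (scoville : List Int) (k : Int), Dom_solution scoville k → Pre_solution scoville k → Spec_solution scoville k (solution scoville k)

-- ===== LEMMAS AND PROOFS =====

def PyHeap.toMS : PyHeap → Multiset Int
  | .nil => 0
  | .nd v l r => v ::ₘ (l.toMS + r.toMS)

def PyHeap.IsHeap : PyHeap → Prop
  | .nil => True
  | .nd v l r => (∀ x ∈ l.toMS + r.toMS, v ≤ x) ∧ l.IsHeap ∧ r.IsHeap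

theorem PyHeap.mergeGo_toMS : ∀ (n : Nat) (t1 t2 : PyHeap), t1.size + t2.size ≤ n →
    (PyHeap.mergeGo n t1 t2).toMS = t1.toMS + t2.toMS := by
  intro n
  induction n with
  | zero =>
      intro t1 t2 hf
      match t1 with
      | .nil => simp [PyHeap.mergeGo, PyHeap.toMS]
      | .nd a l r => simp [PyHeap.size] at hf
  | succ n ih =>
      intro t1 t2 hf
      match t1, t2 with
      | .nil, t2 => simp [PyHeap.mergeGo, PyHeap.toMS]
      | .nd a l1 r1, .nil => simp [PyHeap.mergeGo, PyHeap.toMS]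
      | .nd a l1 r1, .nd b l2 r2 =>
          simp only [PyHeap.size] at hf
          rw [PyHeap.mergeGo]
          split_ifs with hab
          · rw [PyHeap.toMS, ih r1 (.nd b l2 r2) (by simp [PyHeap.size]; omega)]
            simp only [PyHeap.toMS, ← Multiset.singleton_add]
            abel
          · rw [PyHeap.toMS, ih r2 (.nd a l1 r1) (by simp [PyHeap.size]; omega)]
            simp only [PyHeap.toMS, ← Multiset.singleton_add]
            abel

theorem PyHeap.merge_toMS (t1 t2 : PyHeap) : (t1.merge t2).toMS = t1.toMS + t2.toMS :=
  PyHeap.mergeGo_toMS _ t1 t2 (le_refl _)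

theorem PyHeap.root_le {a : Int} {l r : PyHeap} (h : (PyHeap.nd a l r).IsHeap) :
    ∀ x ∈ (PyHeap.nd a l r).toMS, a ≤ x := by
  intro x hx
  simp only [PyHeap.toMS, Multiset.mem_cons, Multiset.mem_add] at hx
  rcases hx with rfl | hx | hx
  · exact le_refl x
  · exact h.1 x (by simp only [Multiset.mem_add]; exact Or.inl hx)
  · exact h.1 x (by simp only [Multiset.mem_add]; exact Or.inr hx)

theorem PyHeap.mergeGo_isHeap : ∀ (n : Nat) (t1 t2 : PyHeap), t1.size + t2.size ≤ n →
    t1.IsHeap → t2.IsHeap → (PyHeap.mergeGo n t1 t2).IsHeap := by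
  intro n
  induction n with
  | zero =>
      intro t1 t2 hf h1 h2
      match t1 with
      | .nil => simpa [PyHeap.mergeGo]
      | .nd a l r => simp [PyHeap.size] at hf
  | succ n ih =>
      intro t1 t2 hf h1 h2
      match t1, t2 with
      | .nil, t2 => simpa [PyHeap.mergeGo]
      | .nd a l1 r1, .nil => simpa [PyHeap.mergeGo]
      | .nd a l1 r1, .nd b l2 r2 =>
          simp only [PyHeap.size] at hf
          rw [PyHeap.mergeGo]
          split_ifs with hab
          · refine ⟨?_, ih r1 (.nd b l2 r2) (by simp [PyHeap.size]; omega) h1.2.2 h2, h1.2.1⟩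
            intro x hx
            rw [PyHeap.mergeGo_toMS n r1 (.nd b l2 r2) (by simp [PyHeap.size]; omega)] at hx
            simp only [Multiset.mem_add] at hx
            rcases hx with (hx | hx) | hx
            · exact h1.1 x (by simp only [Multiset.mem_add]; exact Or.inr hx)
            · exact le_trans hab (PyHeap.root_le h2 x hx)
            · exact h1.1 x (by simp only [Multiset.mem_add]; exact Or.inl hx)
          · have hba : b ≤ a := le_of_not_ge hab
            refine ⟨?_, ih r2 (.nd a l1 r1) (by simp [PyHeap.size]; omega) h2.2.2 h1, h2.2.1⟩
            intro x hx
            rw [PyHeap.mergeGo_toMS n r2 (.nd a l1 r1) (by simp [PyHeap.size]; omega)] at hx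
            simp only [Multiset.mem_add] at hx
            rcases hx with (hx | hx) | hx
            · exact h2.1 x (by simp only [Multiset.mem_add]; exact Or.inr hx)
            · exact le_trans hba (PyHeap.root_le h1 x hx)
            · exact h2.1 x (by simp only [Multiset.mem_add]; exact Or.inl hx)

theorem PyHeap.merge_isHeap {t1 t2 : PyHeap} (h1 : t1.IsHeap) (h2 : t2.IsHeap) :
    (t1.merge t2).IsHeap :=
  PyHeap.mergeGo_isHeap _ t1 t2 (le_refl _) h1 h2

theorem PyHeap.push_toMS (v : Int) (t : PyHeap) : (PyHeap.push v t).toMS = v ::ₘ t.toMS := by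
  rw [PyHeap.push, PyHeap.merge_toMS]
  simp [PyHeap.toMS]

theorem PyHeap.push_isHeap (v : Int) {t : PyHeap} (h : t.IsHeap) : (PyHeap.push v t).IsHeap :=
  PyHeap.merge_isHeap (by simp [PyHeap.IsHeap, PyHeap.toMS]) h

theorem PyHeap.size_eq_card (t : PyHeap) : t.size = Multiset.card t.toMS := by
  induction t with
  | nil => rfl
  | nd v l r ihl ihr => simp [PyHeap.size, PyHeap.toMS, ihl, ihr]

theorem PyHeap.heapify_go (xs : List Int) : ∀ h : PyHeap,
    (xs.foldl (fun h x => PyHeap.push x h) h).toMS = h.toMS + ↑xs ∧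
      (h.IsHeap → (xs.foldl (fun h x => PyHeap.push x h) h).IsHeap) := by
  induction xs with
  | nil => intro h; simp
  | cons x xs ih =>
      intro h
      refine ⟨?_, fun hh => (ih (PyHeap.push x h)).2 (PyHeap.push_isHeap x hh)⟩
      rw [List.foldl_cons, (ih (PyHeap.push x h)).1, PyHeap.push_toMS]
      simp only [← Multiset.cons_coe, ← Multiset.singleton_add]
      abel

-- the min() of a pool whose multiset matches the heap equals the heap's root
theorem min_eq_root {a : Int} {hl hr : PyHeap} {pool : List Int}
    (hh : (PyHeap.nd a hl hr).IsHeap)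
    (hms : (PyHeap.nd a hl hr).toMS = ↑pool) :
    PySem.List.min? pool (fun x => x) = some a := by
  have hane : a ∈ pool := by
    have : a ∈ (PyHeap.nd a hl hr).toMS := by simp [PyHeap.toMS]
    rw [hms] at this; exact_mod_cast this
  rcases hmin : PySem.List.min? pool (fun x => x) with _ | m
  · exact absurd ((PySem.List.min?_eq_none_iff pool (fun x => x)).mp hmin) (by rintro rfl; simp at hane)
  · have hm : m ∈ pool := PySem.List.min?_mem hmin
    have hma : m ≤ a := PySem.List.min?_isMin hmin a hane
    have ham : a ≤ m := by
      apply PyHeap.root_le hh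
      rw [hms]; exact_mod_cast hm
    rw [le_antisymm hma ham]

theorem loopA_stop {a k : Int} (m : Nat) (l r : PyHeap) (mix : Int) (hk : ¬ a < k) :
    solutionLoop k (m + 1) (.nd a l r) mix = mix := by
  rw [solutionLoop.eq_def]; simp [hk]

theorem loopA_neg1 {a k : Int} {l r : PyHeap} (m : Nat) (mix : Int) (hk : a < k)
    (hm : l.merge r = .nil) : solutionLoop k (m + 1) (.nd a l r) mix = -1 := by
  rw [solutionLoop.eq_def]
  simp only [if_pos hk]
  split
  · rfl
  · next b l2 r2 h => rw [hm] at h; cases h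

theorem loopA_step {a k b : Int} {l r l2 r2 : PyHeap} (m : Nat) (mix : Int) (hk : a < k)
    (hm : l.merge r = .nd b l2 r2) :
    solutionLoop k (m + 1) (.nd a l r) mix
      = solutionLoop k m (PyHeap.push (a + b * 2) (l2.merge r2)) (mix + 1) := by
  rw [solutionLoop.eq_def]
  simp only [if_pos hk]
  split
  · next h => rw [hm] at h; cases h
  · next b' l2' r2' h => rw [hm] at h; cases h; rfl

theorem loop_agree (k : Int) : ∀ (m : Nat) (h : PyHeap) (n : Nat) (pool : List Int) (mix : Int),
    h.size ≤ m → pool.length ≤ n → h.IsHeap → h.toMS = ↑pool →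
    solutionLoop k m h mix = solutionAltLoop k n pool mix := by
  intro m
  induction m with
  | zero =>
      intro h n pool mix hm hn hh hms
      have hnil : h = .nil := by
        match h with
        | .nil => rfl
        | .nd a l r => simp [PyHeap.size] at hm
      subst hnil
      have hP : pool = [] := by
        have h0 : (↑pool : Multiset Int) = 0 := by rw [← hms]; rfl
        simpa using h0
      subst hP
      match n with
      | 0 => rfl
      | n + 1 =>
          rw [solutionLoop.eq_def, solutionAltLoop.eq_def]
          simp [PySem.List.min?]
  | succ m ih =>
      intro h n pool mix hm hn hh hms
      match h with
      | .nil =>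
          have hP : pool = [] := by
            have h0 : (↑pool : Multiset Int) = 0 := by rw [← hms]; rfl
            simpa using h0
          subst hP
          match n with
          | 0 => rfl
          | n + 1 =>
              rw [solutionLoop.eq_def, solutionAltLoop.eq_def]
              simp [PySem.List.min?]
      | .nd a hl hr =>
          have hpne : pool ≠ [] := by
            rintro rfl
            exact absurd hms (by simp [PyHeap.toMS])
          match n with
          | 0 => exact absurd (List.eq_nil_of_length_eq_zero (by omega)) hpne
          | n + 1 =>
            have hminA := min_eq_root hh hms
            rw [solutionAltLoop.eq_def]
            simp only [hminA]
            by_cases hk : a < k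
            · simp only [if_pos hk]
              have hcardP : pool.length = hl.size + hr.size + 1 := by
                have := congrArg Multiset.card hms
                simp only [PyHeap.toMS, Multiset.card_cons, Multiset.card_add,
                  Multiset.coe_card, ← PyHeap.size_eq_card] at this
                omega
              have hrest : (hl.merge hr).toMS = ↑(pool.erase a) := by
                have : (PyHeap.nd a hl hr).toMS.erase a = (↑pool : Multiset Int).erase a := by
                  rw [hms]
                simpa [PyHeap.toMS, Multiset.erase_cons_head, PyHeap.merge_toMS,
                  Multiset.coe_erase] using this
              have hamem : a ∈ pool := by
                have : a ∈ (PyHeap.nd a hl hr).toMS := by simp [PyHeap.toMS]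
                rw [hms] at this; exact_mod_cast this
              have hrh : (hl.merge hr).IsHeap := PyHeap.merge_isHeap hh.2.1 hh.2.2
              match hmrg : hl.merge hr with
              | .nil =>
                  -- single element: pool = [a], length < 2
                  have hlen1 : pool.length = 1 := by
                    rw [hmrg] at hrest
                    have := congrArg Multiset.card hrest
                    simp only [PyHeap.toMS, Multiset.card_zero, Multiset.coe_card] at this
                    have := List.length_erase_of_mem hamem
                    omega
                  rw [loopA_neg1 m mix hk hmrg]
                  simp [hlen1]
              | .nd b l2 r2 =>
                  rw [hmrg] at hrest hrh
                  have hlen2 : ¬ pool.length < 2 := by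
                    have := congrArg Multiset.card hrest
                    simp only [PyHeap.toMS, Multiset.card_cons, Multiset.card_add,
                      Multiset.coe_card] at this
                    have := List.length_erase_of_mem hamem
                    omega
                  simp only [if_neg hlen2]
                  rw [PySem.List.remove?_eq_some_erase pool a hamem]
                  have hminB := min_eq_root hrh hrest
                  simp only [hminB]
                  have hbmem : b ∈ pool.erase a := by
                    have : b ∈ (PyHeap.nd b l2 r2).toMS := by simp [PyHeap.toMS]
                    rw [hrest] at this; exact_mod_cast this
                  rw [PySem.List.remove?_eq_some_erase (pool.erase a) b hbmem]
                  rw [loopA_step m mix hk hmrg]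
                  apply ih
                  · rw [PyHeap.size_eq_card, PyHeap.push_toMS, PyHeap.merge_toMS]
                    have hc1 : Multiset.card ((PyHeap.nd b l2 r2).toMS) = pool.length - 1 := by
                      rw [hrest]; simp [List.length_erase_of_mem hamem]
                    simp only [PyHeap.toMS, Multiset.card_cons, Multiset.card_add] at hc1 ⊢
                    simp only [PyHeap.size] at hm
                    omega
                  · have h1 := List.length_erase_of_mem hamem
                    have h2 := List.length_erase_of_mem hbmem
                    simp only [List.length_append, List.length_cons, List.length_nil]
                    omega
                  · exact PyHeap.push_isHeap _ (PyHeap.merge_isHeap hrh.2.1 hrh.2.2)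
                  · rw [PyHeap.push_toMS, PyHeap.merge_toMS]
                    have hrest2 : l2.toMS + r2.toMS = ↑((pool.erase a).erase b) := by
                      have : (PyHeap.nd b l2 r2).toMS.erase b
                          = (↑(pool.erase a) : Multiset Int).erase b := by rw [hrest]
                      simpa [PyHeap.toMS, Multiset.erase_cons_head, Multiset.coe_erase] using this
                    rw [hrest2]
                    have hv : (a + b * 2) = (a + 2 * b) := by ring
                    rw [hv,
                      show ((a + 2 * b) ::ₘ (↑((pool.erase a).erase b) : Multiset Int))
                          = ↑((a + 2 * b) :: (pool.erase a).erase b) from rfl,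
                      Multiset.coe_eq_coe]
                    exact (List.perm_append_singleton _ _).symm
            · rw [loopA_stop m hl hr mix hk]
              simp [hk]

-- ===== VERDICT (by name: the statement is the Claim_ definition above) =====
theorem solution_spec : Claim_equal_solution := by
  intro scoville k _hdom _hpre
  unfold Spec_solution solution solution_alt
  have hsz : (PyHeap.heapify scoville).size = scoville.length := by
    rw [PyHeap.size_eq_card,
      show PyHeap.heapify scoville = scoville.foldl (fun h x => PyHeap.push x h) .nil from rfl,
      (PyHeap.heapify_go scoville PyHeap.nil).1]
    simp [PyHeap.toMS]
  have hheap : (PyHeap.heapify scoville).IsHeap :=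
    (PyHeap.heapify_go scoville PyHeap.nil).2 trivial
  have hms : (PyHeap.heapify scoville).toMS = ↑scoville := by
    rw [show PyHeap.heapify scoville = scoville.foldl (fun h x => PyHeap.push x h) .nil from rfl,
      (PyHeap.heapify_go scoville PyHeap.nil).1]
    simp [PyHeap.toMS]
  rw [hsz]
  exact loop_agree k scoville.length (PyHeap.heapify scoville) scoville.length scoville 0
    (le_of_eq (by rw [hsz])) (le_refl _) hheap hms
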